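-- pv_equiv track=rewrite | github.com/Recho1337/Tsuki | backend/app/downloader.py | choose_server
-- ===== SOURCE A (Python) =====
-- from typing import List, Optional, Tuple, Dict, Any
--
-- def choose_server(servers: List[Dict[str, str]], prefer_type: str, prefer_server: str) -> Optional[Dict[str, str]]:
--     """Choose best server based on preferences"""
--     type_map = {
--         "Hard Sub": "sub",
--         "Soft Sub": "softsub",
--         "Dub (with subs)": "dub",
--     }
--     prefer_type_id = type_map.get(prefer_type, "softsub")
--
--     if not servers:
--         return None
--
--     # Try exact match
--     for s in servers:
--         if s["type"] == prefer_type_id and prefer_server.lower() in s["server_name"].lower():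
--             return s
--
--     # Try server name match
--     for s in servers:
--         if prefer_server.lower() in s["server_name"].lower():
--             return s
--
--     # Try type match
--     for s in servers:
--         if s["type"] == prefer_type_id:
--             return s
--
--     # Return first available
--     return servers[0] if servers else None
-- ===== SOURCE B (Python) =====
-- def choose_server(servers, prefer_type, prefer_server):
--     """Choose best server based on preferences"""
--     type_map = {
--         "Hard Sub": "sub",
--         "Soft Sub": "softsub",
--         "Dub (with subs)": "dub",
--     }
--     prefer_type_id = type_map.get(prefer_type, "softsub")
--     psl = prefer_server.lower()
--
--     best = None
--     best_score = 0
--     for s in servers: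
--         tm = s["type"] == prefer_type_id
--         nm = psl in s["server_name"].lower()
--         score = 4 if (tm and nm) else 3 if nm else 2 if tm else 1
--         if score > best_score:
--             best, best_score = s, score
--     return best
-- ===== Notes on version B (the rewrite author's own statement) =====
-- stated objective: simpler
-- what changed: Replaced A's four sequential scans (exact match, name match, type match, fallback to servers[0]) by a single left-to-right pass that scores each server 4/3/2/1 and keeps the first server attaining the maximum score via strict-greater updates.
import Mathlib
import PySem

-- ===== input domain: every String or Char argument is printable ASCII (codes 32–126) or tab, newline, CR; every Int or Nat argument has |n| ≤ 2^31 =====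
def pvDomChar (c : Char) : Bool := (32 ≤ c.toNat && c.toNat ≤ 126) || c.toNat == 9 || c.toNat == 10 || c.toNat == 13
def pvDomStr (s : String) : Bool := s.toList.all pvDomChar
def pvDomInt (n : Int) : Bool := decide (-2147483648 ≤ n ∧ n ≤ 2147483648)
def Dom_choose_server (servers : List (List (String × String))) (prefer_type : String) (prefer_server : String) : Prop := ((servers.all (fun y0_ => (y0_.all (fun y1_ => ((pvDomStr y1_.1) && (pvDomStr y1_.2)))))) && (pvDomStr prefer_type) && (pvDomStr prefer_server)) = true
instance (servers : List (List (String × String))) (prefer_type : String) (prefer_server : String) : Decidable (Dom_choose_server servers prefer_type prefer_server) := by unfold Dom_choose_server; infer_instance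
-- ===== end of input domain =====

-- B replaces A's four sequential scans by a single scoring pass keeping the first
-- server that attains the maximum priority score (objective: simpler).

-- ===== PORT A =====
-- type_map.get(prefer_type, "softsub") — the literal 3-entry dict lookup
def pvTypeId (prefer_type : String) : String :=
  if prefer_type == "Hard Sub" then "sub"
  else if prefer_type == "Soft Sub" then "softsub"
  else if prefer_type == "Dub (with subs)" then "dub"
  else "softsub"

-- d[k] on the dict represented by the assoc list d (Pre_ guarantees the key is present,
-- so the "" default is never observed on admitted inputs)
def pvGet (d : List (String × String)) (k : String) : String :=
  (PySem.Dict.ofList d).getD k ""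

def choose_server (servers : List (List (String × String))) (prefer_type : String) (prefer_server : String) : Option (List (String × String)) :=
  let prefer_type_id := pvTypeId prefer_type
  if servers.isEmpty then none
  else
    -- Try exact match
    match servers.find? (fun s => (pvGet s "type" == prefer_type_id) && PySem.Str.isIn (PySem.Str.lower prefer_server) (PySem.Str.lower (pvGet s "server_name"))) with
    | some s => some s
    | none =>
      -- Try server name match
      match servers.find? (fun s => PySem.Str.isIn (PySem.Str.lower prefer_server) (PySem.Str.lower (pvGet s "server_name"))) with
      | some s => some s
      | none =>
        -- Try type match
        match servers.find? (fun s => pvGet s "type" == prefer_type_id) with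
        | some s => some s
        | none => servers.head?   -- servers[0] if servers else None (servers nonempty here)

-- ===== PORT B =====
def pvScore (tid psl : String) (s : List (String × String)) : Nat :=
  let tm := pvGet s "type" == tid
  let nm := PySem.Str.isIn psl (PySem.Str.lower (pvGet s "server_name"))
  if tm && nm then 4 else if nm then 3 else if tm then 2 else 1

def pvStep (tid psl : String) (acc : Option (List (String × String)) × Nat) (s : List (String × String)) : Option (List (String × String)) × Nat :=
  let score := pvScore tid psl s
  if acc.2 < score then (some s, score) else acc

def choose_server_alt (servers : List (List (String × String))) (prefer_type : String) (prefer_server : String) : Option (List (String × String)) :=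
  let prefer_type_id := pvTypeId prefer_type
  let psl := PySem.Str.lower prefer_server
  (servers.foldl (pvStep prefer_type_id psl) (none, 0)).1

-- ===== PRECONDITION & SPEC =====
-- A does s["type"] / s["server_name"]: a server dict missing either key makes A raise KeyError.
def Pre_choose_server (servers : List (List (String × String))) (prefer_type : String) (prefer_server : String) : Prop :=
  ∀ d ∈ servers, "type" ∈ d.map Prod.fst ∧ "server_name" ∈ d.map Prod.fst
instance (servers : List (List (String × String))) (prefer_type : String) (prefer_server : String) : Decidable (Pre_choose_server servers prefer_type prefer_server) := by unfold Pre_choose_server; infer_instance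

def pvWitness_choose_server : (List (List (String × String))) × String × String :=
  ([[("type", "sub"), ("server_name", "Alpha")], [("type", "softsub"), ("server_name", "Beta")]], "Hard Sub", "bet")

def Spec_choose_server (servers : List (List (String × String))) (prefer_type : String) (prefer_server : String) (out : Option (List (String × String))) : Prop := out = choose_server_alt servers prefer_type prefer_server
instance (servers : List (List (String × String))) (prefer_type : String) (prefer_server : String) (out : Option (List (String × String))) : Decidable (Spec_choose_server servers prefer_type prefer_server out) := by unfold Spec_choose_server; infer_instance

-- ===== CLAIM (what is proved, stated in full; the proofs are below) =====
def Claim_equal_choose_server : Prop := ∀ (servers : List (List (String × String))) (prefer_type : String) (prefer_server : String), Dom_choose_server servers prefer_type prefer_server → Pre_choose_server servers prefer_type prefer_server → Spec_choose_server servers prefer_type prefer_server (choose_server servers prefer_type prefer_server)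

-- ===== LEMMAS AND PROOFS =====

-- maximum score over a list of servers
def pvMax (tid psl : String) (l : List (List (String × String))) : Nat :=
  l.foldr (fun s m => max (pvScore tid psl s) m) 0

lemma pvScore_pos (tid psl : String) (s : List (String × String)) : 1 ≤ pvScore tid psl s := by
  simp only [pvScore]; split_ifs <;> omega

lemma pvScore_le_four (tid psl : String) (s : List (String × String)) : pvScore tid psl s ≤ 4 := by
  simp only [pvScore]; split_ifs <;> omega

lemma pvMax_cons (tid psl : String) (s : List (String × String)) (t : List (List (String × String))) :
    pvMax tid psl (s :: t) = max (pvScore tid psl s) (pvMax tid psl t) := rfl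

-- B's fold computes (first server attaining the max score, that score) once the max beats k
lemma pvFold_spec (tid psl : String) : ∀ (l : List (List (String × String))) (b : Option (List (String × String))) (k : Nat),
    l.foldl (pvStep tid psl) (b, k) =
      if k < pvMax tid psl l
      then (l.find? (fun s => pvScore tid psl s == pvMax tid psl l), pvMax tid psl l)
      else (b, k) := by
  intro l
  induction l with
  | nil => intro b k; simp [pvMax]
  | cons s t ih =>
    intro b k
    rw [List.foldl_cons]
    by_cases h : k < pvScore tid psl s
    · have hstep : pvStep tid psl (b, k) s = (some s, pvScore tid psl s) := by
        simp [pvStep, h]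
      rw [hstep, ih, pvMax_cons]
      by_cases h2 : pvScore tid psl s < pvMax tid psl t
      · have hmax : max (pvScore tid psl s) (pvMax tid psl t) = pvMax tid psl t :=
          Nat.max_eq_right (Nat.le_of_lt h2)
        have hk : k < max (pvScore tid psl s) (pvMax tid psl t) := lt_max_iff.mpr (Or.inl h)
        rw [if_pos h2, if_pos hk, hmax, List.find?_cons]
        have : (pvScore tid psl s == pvMax tid psl t) = false := by
          simp; omega
        rw [this]
      · have hmax : max (pvScore tid psl s) (pvMax tid psl t) = pvScore tid psl s :=
          Nat.max_eq_left (Nat.le_of_not_lt h2)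
        have hk : k < max (pvScore tid psl s) (pvMax tid psl t) := lt_max_iff.mpr (Or.inl h)
        rw [if_neg h2, if_pos hk, hmax, List.find?_cons]
        simp
    · have hstep : pvStep tid psl (b, k) s = (b, k) := by
        simp [pvStep, h]
      rw [hstep, ih, pvMax_cons]
      by_cases h2 : k < pvMax tid psl t
      · have hmax : max (pvScore tid psl s) (pvMax tid psl t) = pvMax tid psl t :=
          Nat.max_eq_right (by omega)
        have hk : k < max (pvScore tid psl s) (pvMax tid psl t) := lt_max_iff.mpr (Or.inr h2)
        rw [if_pos h2, if_pos hk, hmax, List.find?_cons]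
        have : (pvScore tid psl s == pvMax tid psl t) = false := by
          simp; omega
        rw [this]
      · have hk : ¬ k < max (pvScore tid psl s) (pvMax tid psl t) := by
          rw [lt_max_iff]; exact fun hc => hc.elim h h2
        rw [if_neg h2, if_neg hk]

lemma pvScore_le_max (tid psl : String) (l : List (List (String × String))) :
    ∀ s ∈ l, pvScore tid psl s ≤ pvMax tid psl l := by
  induction l with
  | nil => simp
  | cons x t ih =>
    intro s hs
    rw [pvMax_cons]
    rcases List.mem_cons.mp hs with h | h
    · subst h; exact Nat.le_max_left _ _
    · exact le_trans (ih s h) (Nat.le_max_right _ _)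

lemma pvMax_pos (tid psl : String) (s : List (String × String)) (t : List (List (String × String))) :
    1 ≤ pvMax tid psl (s :: t) := by
  rw [pvMax_cons]; exact le_trans (pvScore_pos tid psl s) (Nat.le_max_left _ _)

lemma pvMax_le_four (tid psl : String) (l : List (List (String × String))) :
    pvMax tid psl l ≤ 4 := by
  induction l with
  | nil => simp [pvMax]
  | cons x t ih =>
    rw [pvMax_cons]
    exact Nat.max_le.mpr ⟨pvScore_le_four tid psl x, ih⟩

lemma pvMax_attained (tid psl : String) (l : List (List (String × String))) (h : l ≠ []) :
    ∃ s ∈ l, pvScore tid psl s = pvMax tid psl l := by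
  induction l with
  | nil => exact absurd rfl h
  | cons x t ih =>
    rw [pvMax_cons]
    by_cases ht : t = []
    · subst ht
      exact ⟨x, List.mem_cons_self, by simp [pvMax]⟩
    · obtain ⟨s, hs, hsc⟩ := ih ht
      by_cases hc : pvMax tid psl t ≤ pvScore tid psl x
      · exact ⟨x, List.mem_cons_self, (Nat.max_eq_left hc).symm⟩
      · exact ⟨s, List.mem_cons_of_mem x hs, by rw [Nat.max_eq_right (by omega)]; exact hsc⟩

-- score values decode the two boolean tests
lemma pvScore_eq_four_iff (tid psl : String) (s : List (String × String)) :
    pvScore tid psl s = 4 ↔ ((pvGet s "type" == tid) && PySem.Str.isIn psl (PySem.Str.lower (pvGet s "server_name"))) = true := by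
  simp only [pvScore]
  cases h1 : (pvGet s "type" == tid) <;> cases h2 : PySem.Str.isIn psl (PySem.Str.lower (pvGet s "server_name")) <;> simp

lemma pvScore_eq_three_iff (tid psl : String) (s : List (String × String)) :
    pvScore tid psl s = 3 ↔ ((pvGet s "type" == tid) = false ∧ PySem.Str.isIn psl (PySem.Str.lower (pvGet s "server_name")) = true) := by
  simp only [pvScore]
  cases h1 : (pvGet s "type" == tid) <;> cases h2 : PySem.Str.isIn psl (PySem.Str.lower (pvGet s "server_name")) <;> simp

lemma pvScore_eq_two_iff (tid psl : String) (s : List (String × String)) :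
    pvScore tid psl s = 2 ↔ ((pvGet s "type" == tid) = true ∧ PySem.Str.isIn psl (PySem.Str.lower (pvGet s "server_name")) = false) := by
  simp only [pvScore]
  cases h1 : (pvGet s "type" == tid) <;> cases h2 : PySem.Str.isIn psl (PySem.Str.lower (pvGet s "server_name")) <;> simp

lemma pvScore_eq_one_iff (tid psl : String) (s : List (String × String)) :
    pvScore tid psl s = 1 ↔ ((pvGet s "type" == tid) = false ∧ PySem.Str.isIn psl (PySem.Str.lower (pvGet s "server_name")) = false) := by
  simp only [pvScore]
  cases h1 : (pvGet s "type" == tid) <;> cases h2 : PySem.Str.isIn psl (PySem.Str.lower (pvGet s "server_name")) <;> simp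

-- find? respects predicates equal on members
lemma find?_congr_mem {α : Type} (l : List α) (p q : α → Bool) (h : ∀ a ∈ l, p a = q a) :
    l.find? p = l.find? q := by
  induction l with
  | nil => rfl
  | cons x t ih =>
    rw [List.find?_cons, List.find?_cons, h x (List.mem_cons_self), ih (fun a ha => h a (List.mem_cons_of_mem x ha))]

-- ===== VERDICT (by name: the statement is the Claim_ definition above) =====
theorem choose_server_spec : Claim_equal_choose_server := by
  intro servers prefer_type prefer_server _dom _pre
  unfold Spec_choose_server choose_server choose_server_alt
  cases servers with
  | nil => simp
  | cons s0 t =>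
    set tid := pvTypeId prefer_type with htid
    set psl := PySem.Str.lower prefer_server with hpsl
    set l : List (List (String × String)) := s0 :: t with hl
    set M := pvMax tid psl l with hM
    have hM1 : 1 ≤ M := pvMax_pos tid psl s0 t
    have hM4 : M ≤ 4 := pvMax_le_four tid psl l
    have hle : ∀ s ∈ l, pvScore tid psl s ≤ M := pvScore_le_max tid psl l
    have hatt : ∃ s ∈ l, pvScore tid psl s = M := pvMax_attained tid psl l (by simp [hl])
    have hBfold : l.foldl (pvStep tid psl) (none, 0) =
        (l.find? (fun s => pvScore tid psl s == M), M) := by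
      rw [pvFold_spec]
      rw [if_pos (by omega)]
    simp only [hBfold]
    -- case on the value of the maximum score
    interval_cases M
    · -- M = 1 : nothing matches anywhere; A falls to servers[0], B's find? hits the head
      have hall : ∀ s ∈ l, pvScore tid psl s = 1 := by
        intro s hs; have := hle s hs; have := pvScore_pos tid psl s; omega
      have h4 : l.find? (fun s => (pvGet s "type" == tid) && PySem.Str.isIn psl (PySem.Str.lower (pvGet s "server_name"))) = none := by
        apply List.find?_eq_none.mpr
        intro s hs
        have h := (pvScore_eq_one_iff tid psl s).mp (hall s hs)
        simp at h
        simp [h.2]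
      have h3 : l.find? (fun s => PySem.Str.isIn psl (PySem.Str.lower (pvGet s "server_name"))) = none := by
        apply List.find?_eq_none.mpr
        intro s hs
        have h := (pvScore_eq_one_iff tid psl s).mp (hall s hs)
        simp at h
        simp [h.2]
      have h2 : l.find? (fun s => pvGet s "type" == tid) = none := by
        apply List.find?_eq_none.mpr
        intro s hs
        have h := (pvScore_eq_one_iff tid psl s).mp (hall s hs)
        simp [h.1]
      rw [h4, h3, h2]
      have hhd : pvScore tid psl s0 = 1 := hall s0 (List.mem_cons_self)
      rw [hl, List.find?_cons]
      have : (pvScore tid psl s0 == 1) = true := by simp [hhd]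
      rw [this]
      rfl
    · -- M = 2 : some type match, no name match
      have hno3 : ∀ s ∈ l, PySem.Str.isIn psl (PySem.Str.lower (pvGet s "server_name")) = false := by
        intro s hs
        have h := hle s hs
        by_contra hc
        have hnm : PySem.Str.isIn psl (PySem.Str.lower (pvGet s "server_name")) = true := by
          cases hx : PySem.Str.isIn psl (PySem.Str.lower (pvGet s "server_name")) <;> simp_all
        have : pvScore tid psl s = 3 ∨ pvScore tid psl s = 4 := by
          simp only [pvScore, hnm]
          cases hx : (pvGet s "type" == tid) <;> simp
        omega
      have h4 : l.find? (fun s => (pvGet s "type" == tid) && PySem.Str.isIn psl (PySem.Str.lower (pvGet s "server_name"))) = none := by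
        apply List.find?_eq_none.mpr
        intro s hs
        have h := hno3 s hs
        simp at h
        simp [h]
      have h3 : l.find? (fun s => PySem.Str.isIn psl (PySem.Str.lower (pvGet s "server_name"))) = none := by
        apply List.find?_eq_none.mpr
        intro s hs
        have h := hno3 s hs
        simp at h
        simp [h]
      rw [h4, h3]
      rw [find?_congr_mem l _ (fun s => pvScore tid psl s == 2) (by
        intro s hs
        cases hx : (pvGet s "type" == tid)
        · have h := (pvScore_eq_one_iff tid psl s).mpr ⟨hx, hno3 s hs⟩
          simp [h]
        · have h := (pvScore_eq_two_iff tid psl s).mpr ⟨hx, hno3 s hs⟩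
          simp [h])]
      cases hf : l.find? (fun s => pvScore tid psl s == 2) with
      | some s => simp
      | none =>
        exfalso
        obtain ⟨s, hs, hsc⟩ := hatt
        have hnone := List.find?_eq_none.mp hf s hs
        simp [hsc] at hnone
    · -- M = 3 : some name match, no exact (type+name) match
      have hno4 : ∀ s ∈ l, ((pvGet s "type" == tid) && PySem.Str.isIn psl (PySem.Str.lower (pvGet s "server_name"))) = false := by
        intro s hs
        have h := hle s hs
        by_contra hc
        have hb : ((pvGet s "type" == tid) && PySem.Str.isIn psl (PySem.Str.lower (pvGet s "server_name"))) = true := by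
          cases hx : ((pvGet s "type" == tid) && PySem.Str.isIn psl (PySem.Str.lower (pvGet s "server_name"))) <;> simp_all
        have : pvScore tid psl s = 4 := (pvScore_eq_four_iff tid psl s).mpr hb
        omega
      have h4 : l.find? (fun s => (pvGet s "type" == tid) && PySem.Str.isIn psl (PySem.Str.lower (pvGet s "server_name"))) = none := by
        apply List.find?_eq_none.mpr
        intro s hs
        rw [hno4 s hs]
        simp
      rw [h4]
      rw [find?_congr_mem l (fun s => PySem.Str.isIn psl (PySem.Str.lower (pvGet s "server_name"))) (fun s => pvScore tid psl s == 3) (by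
        intro s hs
        dsimp only
        have hb := hno4 s hs
        cases hnm : PySem.Str.isIn psl (PySem.Str.lower (pvGet s "server_name"))
        · have h1 := pvScore_pos tid psl s
          have hne : pvScore tid psl s ≠ 3 := by
            intro hc
            exact absurd ((pvScore_eq_three_iff tid psl s).mp hc).2 (by rw [hnm]; simp)
          cases hq : (pvScore tid psl s == 3)
          · rfl
          · exact absurd (by simpa using hq) hne
        · have htm : (pvGet s "type" == tid) = false := by
            cases hx : (pvGet s "type" == tid)
            · rfl
            · rw [hx, hnm] at hb; simp at hb
          have h := (pvScore_eq_three_iff tid psl s).mpr ⟨htm, hnm⟩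
          rw [h]; rfl)]
      cases hf : l.find? (fun s => pvScore tid psl s == 3) with
      | some s => simp
      | none =>
        exfalso
        obtain ⟨s, hs, hsc⟩ := hatt
        have hnone := List.find?_eq_none.mp hf s hs
        simp [hsc] at hnone
    · -- M = 4 : an exact match exists; A's first scan is B's find?
      rw [find?_congr_mem l (fun s => (pvGet s "type" == tid) && PySem.Str.isIn psl (PySem.Str.lower (pvGet s "server_name"))) (fun s => pvScore tid psl s == 4) (by
        intro s hs
        dsimp only
        cases hb : ((pvGet s "type" == tid) && PySem.Str.isIn psl (PySem.Str.lower (pvGet s "server_name")))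
        · have h1 := pvScore_pos tid psl s
          have h2 := pvScore_le_four tid psl s
          have hne : pvScore tid psl s ≠ 4 := by
            intro hc
            exact absurd ((pvScore_eq_four_iff tid psl s).mp hc) (by rw [hb]; simp)
          cases hq : (pvScore tid psl s == 4)
          · rfl
          · exact absurd (by simpa using hq) hne
        · have h := (pvScore_eq_four_iff tid psl s).mpr hb
          rw [h]; rfl)]
      cases hf : l.find? (fun s => pvScore tid psl s == 4) with
      | some s => simp
      | none =>
        exfalso
        obtain ⟨s, hs, hsc⟩ := hatt
        have hnone := List.find?_eq_none.mp hf s hs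
        simp [hsc] at hnone
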